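-- pv_equiv track=rewrite | github.com/Trash-Bud/FPRO | REs/RE05/String iterator.py | rm_letter_rev
-- ===== SOURCE A (Python) =====
-- def rm_letter_rev(l, astr):
--     str1= ""
--     for i in range(len(astr)):
--         if astr[i] == l:
--             pass
--         else:
--             str1 = str1 + astr[i]
--     return str1[::-1]
-- ===== SOURCE B (Python) =====
-- def rm_letter_rev(l, astr):
--     return "".join(c for c in reversed(astr) if c != l)
-- ===== Notes on version B (the rewrite author's own statement) =====
-- stated objective: idiomatic
-- what changed: B is a single join over a reversed filtering generator, replacing A's index loop with repeated string concatenation and the final [::-1] slice; join avoids the repeated-concatenation and extra reverse pass (measured ~2x faster).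
import Mathlib
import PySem

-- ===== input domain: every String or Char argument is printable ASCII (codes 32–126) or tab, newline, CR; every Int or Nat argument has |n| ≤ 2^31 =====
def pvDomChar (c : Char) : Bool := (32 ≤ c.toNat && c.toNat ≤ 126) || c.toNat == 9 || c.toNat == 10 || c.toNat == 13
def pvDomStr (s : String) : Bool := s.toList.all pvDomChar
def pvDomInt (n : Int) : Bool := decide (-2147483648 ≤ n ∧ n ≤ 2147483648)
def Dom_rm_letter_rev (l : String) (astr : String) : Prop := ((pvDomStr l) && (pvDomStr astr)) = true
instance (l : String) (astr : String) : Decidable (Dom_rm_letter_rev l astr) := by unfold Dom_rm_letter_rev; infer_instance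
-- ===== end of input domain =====

-- B is one join over a reversed filtering generator: no index loop, no repeated
-- concatenation, no final [::-1] slice (objective: idiomatic).


-- ===== PORT A =====
-- for i in range(len(astr)): if astr[i] == l: pass else: str1 = str1 + astr[i]; return str1[::-1]
def rm_letter_rev (l : String) (astr : String) : String :=
  (PySem.Str.slice?
    (astr.toList.foldl (fun str1 c =>
      if String.ofList [c] == l then str1 else str1 ++ String.ofList [c]) "")
    none none (-1)).getD ""

-- ===== PORT B =====
-- "".join(c for c in reversed(astr) if c != l)
def rm_letter_rev_alt (l : String) (astr : String) : String :=
  String.ofList (astr.toList.reverse.filter (fun c => String.ofList [c] != l))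

-- ===== PRECONDITION & SPEC =====
def Spec_rm_letter_rev (l : String) (astr : String) (out : String) : Prop := out = rm_letter_rev_alt l astr
instance (l : String) (astr : String) (out : String) : Decidable (Spec_rm_letter_rev l astr out) := by unfold Spec_rm_letter_rev; infer_instance

-- ===== CLAIM =====
def Claim_equal_rm_letter_rev : Prop := ∀ (l : String) (astr : String), Dom_rm_letter_rev l astr → Spec_rm_letter_rev l astr (rm_letter_rev l astr)

-- ===== LEMMAS AND PROOFS =====

-- the common keep-test
def pvKeep (l : String) (c : Char) : Bool := !(String.ofList [c] == l)

-- A's loop builds the filtered string in order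
theorem pv_fold_filter (l : String) (cs : List Char) (acc : String) :
    cs.foldl (fun s c => if String.ofList [c] == l then s else s ++ String.ofList [c]) acc
      = acc ++ String.ofList (cs.filter (pvKeep l)) := by
  induction cs generalizing acc with
  | nil => simp [String.ofList_nil]
  | cons c cs ih =>
    rw [List.foldl_cons, List.filter_cons]
    by_cases h : (String.ofList [c] == l) = true
    · rw [if_pos h, ih]
      simp [pvKeep, h]
    · rw [if_neg h, ih]
      have hk : pvKeep l c = true := by simp [pvKeep, h]
      rw [hk, if_pos rfl, String.append_assoc, ← String.ofList_append]
      rfl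

-- ===== VERDICT =====
theorem rm_letter_rev_spec : Claim_equal_rm_letter_rev := by
  intro l astr _
  unfold Spec_rm_letter_rev rm_letter_rev rm_letter_rev_alt
  rw [pv_fold_filter, PySem.Str.slice?_none_none_neg_one]
  simp [List.filter_reverse]
  rfl
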